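-- pv_equiv track=rewrite | github.com/Ricky-84/LEGALS-BNS-Legal-Advisory-System | backend/app/services/neo4j_service.py | _has_trespass_elements
-- ===== SOURCE A (Python) =====
-- from typing import List, Dict, Any, Optional
--
-- def _has_trespass_elements(entities: Dict[str, List[str]]) -> bool:
--     """Check if entities indicate criminal trespass"""
--     actions = entities.get("actions", [])
--     locations = entities.get("locations", [])
--     circumstances = entities.get("circumstances", [])
--     intentions = entities.get("intentions", [])
--
--     # Trespass-specific indicators (including semantic mappings)
--     trespass_actions = ["entered", "broke into", "trespassed", "intruded", "invaded", "climbed over", "jumped over", "snuck into", "came inside", "went into", "accessed"]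
--     trespass_locations = ["house", "home", "property", "land", "building", "apartment", "office", "compound", "premises", "yard", "garden", "roof"]
--     unlawful_circumstances = ["without permission", "unauthorized", "illegally", "unlawfully", "forcibly", "broke in", "climbed", "scaled", "fence", "wall", "gate", "boundary"]
--     trespass_intentions = ["to steal", "to commit", "unlawful purpose", "criminal intent"]
--
--     # Check all entity types for trespass indicators
--     all_text = " ".join(actions + locations + circumstances + intentions).lower()
--
--     has_trespass_action = any(trespass_action.lower() in action.lower() for action in actions for trespass_action in trespass_actions)
--     has_property_location = any(location.lower() in loc.lower() for loc in locations for location in trespass_locations)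
--     has_unlawful_circumstance = any(unlawful_circ.lower() in circumstance.lower() for circumstance in circumstances for unlawful_circ in unlawful_circumstances)
--
--     # Also check for trespass patterns in combined text
--     has_trespass_pattern = any(pattern in all_text for pattern in trespass_actions + unlawful_circumstances)
--
--     # Criminal trespass requires entry action + property location OR unlawful circumstances
--     return (has_trespass_action and has_property_location) or has_unlawful_circumstance or has_trespass_pattern
-- ===== SOURCE B (Python) =====
-- def _has_trespass_elements(entities):
--     """Check if entities indicate criminal trespass"""
--     patterns = ["entered", "broke into", "trespassed", "intruded", "invaded", "climbed over", "jumped over", "snuck into", "came inside", "went into", "accessed",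
--                 "without permission", "unauthorized", "illegally", "unlawfully", "forcibly", "broke in", "climbed", "scaled", "fence", "wall", "gate", "boundary"]
--     all_text = " ".join(entities.get("actions", []) + entities.get("locations", []) +
--                         entities.get("circumstances", []) + entities.get("intentions", [])).lower()
--     return any(p in all_text for p in patterns)
-- ===== Notes on version B (the rewrite author's own statement) =====
-- stated objective: simpler
-- what changed: B drops A's three per-entity keyword scans and the location list entirely, returning the single combined-text pattern check that provably subsumes A's whole disjunction.
import Mathlib
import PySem

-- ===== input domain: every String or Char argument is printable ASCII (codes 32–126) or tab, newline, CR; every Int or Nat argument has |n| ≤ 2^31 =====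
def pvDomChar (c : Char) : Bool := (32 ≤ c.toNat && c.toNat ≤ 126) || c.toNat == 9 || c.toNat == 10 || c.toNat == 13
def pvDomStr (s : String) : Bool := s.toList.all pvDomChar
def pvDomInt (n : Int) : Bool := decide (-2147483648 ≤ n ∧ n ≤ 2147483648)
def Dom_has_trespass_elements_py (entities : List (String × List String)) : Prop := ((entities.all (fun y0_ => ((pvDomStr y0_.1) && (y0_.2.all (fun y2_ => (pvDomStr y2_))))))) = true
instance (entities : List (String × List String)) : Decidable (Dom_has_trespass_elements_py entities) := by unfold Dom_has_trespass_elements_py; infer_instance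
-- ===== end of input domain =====

-- B collapses A's three entity-wise keyword scans into the single combined-text pattern
-- check that A already performs, which provably subsumes them (objective: simpler).

-- ===== PORT A =====
def has_trespass_elements_py (entities : List (String × List String)) : Bool :=
  let actions := PySem.Dict.getD (PySem.Dict.mk entities) "actions" []
  let locations := PySem.Dict.getD (PySem.Dict.mk entities) "locations" []
  let circumstances := PySem.Dict.getD (PySem.Dict.mk entities) "circumstances" []
  let intentions := PySem.Dict.getD (PySem.Dict.mk entities) "intentions" []
  let trespass_actions : List String := ["entered", "broke into", "trespassed", "intruded", "invaded", "climbed over", "jumped over", "snuck into", "came inside", "went into", "accessed"]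
  let trespass_locations : List String := ["house", "home", "property", "land", "building", "apartment", "office", "compound", "premises", "yard", "garden", "roof"]
  let unlawful_circumstances : List String := ["without permission", "unauthorized", "illegally", "unlawfully", "forcibly", "broke in", "climbed", "scaled", "fence", "wall", "gate", "boundary"]
  let _trespass_intentions : List String := ["to steal", "to commit", "unlawful purpose", "criminal intent"]
  let all_text := PySem.Str.lower (PySem.Str.join " " (actions ++ locations ++ circumstances ++ intentions))
  let has_trespass_action := actions.any (fun action => trespass_actions.any (fun trespass_action => PySem.Str.isIn (PySem.Str.lower trespass_action) (PySem.Str.lower action)))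
  let has_property_location := locations.any (fun loc => trespass_locations.any (fun location => PySem.Str.isIn (PySem.Str.lower location) (PySem.Str.lower loc)))
  let has_unlawful_circumstance := circumstances.any (fun circumstance => unlawful_circumstances.any (fun unlawful_circ => PySem.Str.isIn (PySem.Str.lower unlawful_circ) (PySem.Str.lower circumstance)))
  let has_trespass_pattern := (trespass_actions ++ unlawful_circumstances).any (fun pattern => PySem.Str.isIn pattern all_text)
  (has_trespass_action && has_property_location) || has_unlawful_circumstance || has_trespass_pattern

-- ===== PORT B =====
def has_trespass_elements_py_alt (entities : List (String × List String)) : Bool :=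
  let patterns : List String := ["entered", "broke into", "trespassed", "intruded", "invaded", "climbed over", "jumped over", "snuck into", "came inside", "went into", "accessed",
    "without permission", "unauthorized", "illegally", "unlawfully", "forcibly", "broke in", "climbed", "scaled", "fence", "wall", "gate", "boundary"]
  let all_text := PySem.Str.lower (PySem.Str.join " " (PySem.Dict.getD (PySem.Dict.mk entities) "actions" [] ++ PySem.Dict.getD (PySem.Dict.mk entities) "locations" [] ++ PySem.Dict.getD (PySem.Dict.mk entities) "circumstances" [] ++ PySem.Dict.getD (PySem.Dict.mk entities) "intentions" []))
  patterns.any (fun p => PySem.Str.isIn p all_text)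

-- ===== PRECONDITION & SPEC =====
def Spec_has_trespass_elements_py (entities : List (String × List String)) (out : Bool) : Prop := out = has_trespass_elements_py_alt entities
instance (entities : List (String × List String)) (out : Bool) : Decidable (Spec_has_trespass_elements_py entities out) := by unfold Spec_has_trespass_elements_py; infer_instance

-- ===== CLAIM (what is proved, stated in full; the proofs are below) =====
def Claim_equal_has_trespass_elements_py : Prop := ∀ (entities : List (String × List String)), Dom_has_trespass_elements_py entities → Spec_has_trespass_elements_py entities (has_trespass_elements_py entities)

-- ===== LEMMAS AND PROOFS =====

theorem pv_intercalate_cons2 {α : Type} (sep x y : List α) (ys : List (List α)) :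
    List.intercalate sep (x :: y :: ys) = x ++ sep ++ List.intercalate sep (y :: ys) := by
  simp [List.intercalate, List.intersperse]

theorem pv_infix_intercalate {α : Type} (sep t : List α) (parts : List (List α)) (h : t ∈ parts) :
    t <:+: sep.intercalate parts := by
  induction parts with
  | nil => cases h
  | cons x xs ih =>
    cases h with
    | head =>
      cases xs with
      | nil => simp [List.intercalate]
      | cons y ys =>
        rw [pv_intercalate_cons2]
        exact ((t.prefix_append _).trans (List.prefix_append _ _)).isInfix
    | tail _ hm =>
      cases xs with
      | nil => cases hm
      | cons y ys => rw [pv_intercalate_cons2]; exact (ih hm).trans (List.suffix_append _ _).isInfix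

-- a keyword found (lowercased) inside one member string is found in the lowercased join
theorem pv_isIn_lower_join_of_mem (sub a : String) (parts : List String) (ha : a ∈ parts)
    (h : PySem.Str.isIn sub (PySem.Str.lower a) = true) :
    PySem.Str.isIn sub (PySem.Str.lower (PySem.Str.join " " parts)) = true := by
  rw [PySem.Str.isIn_iff_infix, PySem.Str.toList_lower] at h ⊢
  rw [PySem.Str.toList_join]
  have hinf : a.toList <:+: PySem.Chars.join " ".toList (parts.map String.toList) :=
    pv_infix_intercalate _ _ _ (List.mem_map_of_mem ha)
  simp only [PySem.Chars.lower] at h ⊢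
  exact h.trans (hinf.map _)

-- one entity-wise keyword scan forces the combined-text pattern scan to fire
theorem pv_block_subsumed (kws pats xs parts : List String)
    (hfix : ∀ k ∈ kws, PySem.Str.lower k = k) (hkp : ∀ k ∈ kws, k ∈ pats)
    (hxs : ∀ x ∈ xs, x ∈ parts)
    (h : xs.any (fun x => kws.any (fun k => PySem.Str.isIn (PySem.Str.lower k) (PySem.Str.lower x))) = true) :
    pats.any (fun p => PySem.Str.isIn p (PySem.Str.lower (PySem.Str.join " " parts))) = true := by
  simp only [List.any_eq_true] at h ⊢
  obtain ⟨x, hx, k, hk, hin⟩ := h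
  refine ⟨k, hkp k hk, ?_⟩
  rw [hfix k hk] at hin
  exact pv_isIn_lower_join_of_mem k x parts (hxs x hx) hin

theorem pv_bool_collapse (x z y p : Bool) (h1 : x = true → p = true) (h2 : y = true → p = true) :
    ((x && z) || y || p) = p := by
  cases x <;> cases y <;> cases z <;> cases p <;> simp_all

-- ===== VERDICT (by name: the statement is the Claim_ definition above) =====
theorem has_trespass_elements_py_spec : Claim_equal_has_trespass_elements_py := by
  intro entities _
  unfold Spec_has_trespass_elements_py
  simp only [has_trespass_elements_py, has_trespass_elements_py_alt, List.cons_append, List.nil_append]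
  refine pv_bool_collapse _ _ _ _ ?_ ?_
  · intro h
    refine pv_block_subsumed _ _ _ _ ?_ ?_ ?_ h
    · decide
    · decide
    · intro x hx; simp [hx]
  · intro h
    refine pv_block_subsumed _ _ _ _ ?_ ?_ ?_ h
    · decide
    · decide
    · intro x hx; simp [hx]
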